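-- pv_equiv track=rewrite | github.com/maogesong/- | attack_logic1a.py | find_best_combo
-- ===== SOURCE A (Python) =====
-- from itertools import combinations
--
-- def find_best_combo(followers, target_hp):
--     """寻找最小过量组合击杀目标"""
--     best = None
--     for r in range(2, len(followers)+1):
--         for combo in combinations(followers, r):
--             total = sum(f['atk'] for f in combo)
--             if total >= target_hp:
--                 over = total - target_hp
--                 if best is None or over < best[0]:
--                     best = (over, combo)
--         if best:
--             return best[1]
--     return None
-- ===== SOURCE B (Python) =====
-- from itertools import combinations
--
-- def find_best_combo(followers, target_hp):
--     """寻找最小过量组合击杀目标 — determine the minimal feasible size r up front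
--     via a descending-sorted prefix sum, then scan combinations of that size once."""
--     n = len(followers)
--     if n < 2:
--         return None
--     atks = sorted((f['atk'] for f in followers), reverse=True)
--     r = 2
--     total = atks[0] + atks[1]
--     while total < target_hp:
--         r += 1
--         if r > n:
--             return None
--         total += atks[r - 1]
--     best_over = None
--     best_combo = None
--     for combo in combinations(followers, r):
--         over = sum(f['atk'] for f in combo) - target_hp
--         if over >= 0 and (best_over is None or over < best_over):
--             best_over = over
--             best_combo = combo
--     return best_combo
-- ===== Notes on version B (the rewrite author's own statement) =====
-- stated objective: faster
-- what changed: Instead of scanning subset sizes r=2,3,... and enumerating every size's combinations until one reaches the target, B computes the minimal feasible size r up front from a descending-sorted prefix sum of the atk values and then enumerates only the combinations of that single size, tracking minimal overkill in one pass.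
import Mathlib
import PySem

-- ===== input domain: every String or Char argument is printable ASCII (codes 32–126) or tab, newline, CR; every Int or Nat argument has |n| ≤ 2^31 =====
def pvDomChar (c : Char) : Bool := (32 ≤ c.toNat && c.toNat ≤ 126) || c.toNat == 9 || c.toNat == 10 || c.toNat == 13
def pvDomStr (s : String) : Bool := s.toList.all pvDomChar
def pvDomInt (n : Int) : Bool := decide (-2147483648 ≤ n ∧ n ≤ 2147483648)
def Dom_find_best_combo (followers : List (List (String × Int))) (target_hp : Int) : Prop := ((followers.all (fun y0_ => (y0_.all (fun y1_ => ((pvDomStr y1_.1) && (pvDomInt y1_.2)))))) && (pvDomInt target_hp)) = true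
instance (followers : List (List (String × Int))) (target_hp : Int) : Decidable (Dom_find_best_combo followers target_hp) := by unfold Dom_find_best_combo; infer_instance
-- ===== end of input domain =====

-- B replaces A's upward scan of subset sizes (enumerating every size's combinations) by computing
-- the minimal feasible size from a descending-sorted prefix sum and enumerating only that one size.

-- ===== PORT A =====
-- f['atk'] as first-match dict lookup; under Pre_ the key is always present, so the default 0 is never used.
def fbcAtk (f : List (String × Int)) : Int := (PySem.Dict.mk f).getD "atk" 0

-- total = sum(f['atk'] for f in combo)
def fbcSum (c : List (List (String × Int))) : Int := (c.map fbcAtk).sum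

-- the body of A's inner `for combo` loop, updating `best`
def fbcStep (target_hp : Int) (best : Option (Int × List (List (String × Int))))
    (combo : List (List (String × Int))) : Option (Int × List (List (String × Int))) :=
  let total := fbcSum combo
  if target_hp ≤ total then
    let ov := total - target_hp
    match best with
    | none => some (ov, combo)
    | some b => if ov < b.1 then some (ov, combo) else best
  else best

-- A's outer `for r in range(2, len+1)` loop with the early `return best[1]`;
-- `best` is None whenever a new r is entered (A returns as soon as it is set).
def fbcLoop (followers : List (List (String × Int))) (target_hp : Int) :
    List Nat → Option (List (List (String × Int)))
  | [] => none
  | r :: rs =>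
    match (PySem.List.combinations followers r).foldl (fbcStep target_hp) none with
    | some b => some b.2
    | none => fbcLoop followers target_hp rs

-- range(2, len(followers)+1) is List.range' 2 (len - 1) (both bounds non-negative, exact)
def find_best_combo (followers : List (List (String × Int))) (target_hp : Int) :
    Option (List (List (String × Int))) :=
  fbcLoop followers target_hp (List.range' 2 (followers.length - 1))

-- ===== PORT B =====
-- the body of B's single `for combo` loop (skips combos with negative overkill)
def fbcAltStep (target_hp : Int) (acc : Option (Int × List (List (String × Int))))
    (combo : List (List (String × Int))) : Option (Int × List (List (String × Int))) :=
  let ov := fbcSum combo - target_hp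
  if 0 ≤ ov then
    match acc with
    | none => some (ov, combo)
    | some b => if ov < b.1 then some (ov, combo) else acc
  else acc

-- B's `while total < target_hp` loop; atks[r-1] via getD (always in range when called, n = atks.length)
def fbcFindR (target_hp : Int) (atks : List Int) (n : Nat) (r : Nat) (total : Int) : Option Nat :=
  if total < target_hp then
    if n < r + 1 then none
    else fbcFindR target_hp atks n (r + 1) (total + atks.getD r 0)
  else some r
termination_by n - r
decreasing_by omega

-- atks = sorted((f['atk'] for f in followers), reverse=True)
def fbcDesc (followers : List (List (String × Int))) : List Int :=
  PySem.List.sorted (followers.map fbcAtk) (fun x => x) true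

-- atks[0]/atks[1]/atks[r-1] are always in range where B reads them, so getD is exact
def find_best_combo_alt (followers : List (List (String × Int))) (target_hp : Int) :
    Option (List (List (String × Int))) :=
  if followers.length < 2 then none
  else
    match fbcFindR target_hp (fbcDesc followers) followers.length 2
        ((fbcDesc followers).getD 0 0 + (fbcDesc followers).getD 1 0) with
    | none => none
    | some r =>
      ((PySem.List.combinations followers r).foldl (fbcAltStep target_hp) none).map Prod.snd

-- ===== PRECONDITION & SPEC =====
-- Pre_ excludes exactly the inputs where the Python A raises KeyError: some follower dict lacks the
-- 'atk' key while there are at least two followers (with fewer than two, A returns None untouched).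
def Pre_find_best_combo (followers : List (List (String × Int))) (target_hp : Int) : Prop :=
  followers.length ≤ 1 ∨ ∀ f ∈ followers, (PySem.Dict.mk f).contains "atk" = true
instance (followers : List (List (String × Int))) (target_hp : Int) : Decidable (Pre_find_best_combo followers target_hp) := by unfold Pre_find_best_combo; infer_instance

def pvWitness_find_best_combo : (List (List (String × Int))) × Int :=
  ([[("atk", 3)], [("atk", 4)], [("atk", 1)]], 5)

def Spec_find_best_combo (followers : List (List (String × Int))) (target_hp : Int) (out : Option (List (List (String × Int)))) : Prop := out = find_best_combo_alt followers target_hp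
instance (followers : List (List (String × Int))) (target_hp : Int) (out : Option (List (List (String × Int)))) : Decidable (Spec_find_best_combo followers target_hp out) := by unfold Spec_find_best_combo; infer_instance

-- ===== CLAIM (what is proved, stated in full; the proofs are below) =====
def Claim_equal_find_best_combo : Prop := ∀ (followers : List (List (String × Int))) (target_hp : Int), Dom_find_best_combo followers target_hp → Pre_find_best_combo followers target_hp → Spec_find_best_combo followers target_hp (find_best_combo followers target_hp)

-- ===== LEMMAS AND PROOFS =====

-- the r-prefix sum of the descending-sorted atk list
def fbcTop (followers : List (List (String × Int))) (r : Nat) : Int :=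
  ((fbcDesc followers).take r).sum

-- A's and B's inner-loop bodies are the same function
theorem fbc_step_eq (t : Int) (acc : Option (Int × List (List (String × Int))))
    (c : List (List (String × Int))) : fbcStep t acc c = fbcAltStep t acc c := by
  unfold fbcStep fbcAltStep
  by_cases h : t ≤ fbcSum c
  · rw [if_pos h, if_pos (by omega : (0:Int) ≤ fbcSum c - t)]
  · rw [if_neg h, if_neg (by omega : ¬ (0:Int) ≤ fbcSum c - t)]

theorem fbc_fold_isSome (t : Int) (l : List (List (List (String × Int))))
    (acc : Option (Int × List (List (String × Int)))) :
    (l.foldl (fbcStep t) acc).isSome = true ↔ acc.isSome = true ∨ ∃ c ∈ l, t ≤ fbcSum c := by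
  induction l generalizing acc with
  | nil => simp
  | cons c l ih =>
    rw [List.foldl_cons, ih]
    have hstep : (fbcStep t acc c).isSome = true ↔ acc.isSome = true ∨ t ≤ fbcSum c := by
      unfold fbcStep
      by_cases h : t ≤ fbcSum c
      · rw [if_pos h]
        cases acc with
        | none => simp [h]
        | some b =>
          by_cases h2 : fbcSum c - t < b.1 <;> simp [h2, h]
      · rw [if_neg h]; simp [h]
    rw [hstep]
    constructor
    · rintro (⟨h | h⟩ | ⟨d, hd, hds⟩)
      · exact Or.inl h
      · exact Or.inr ⟨c, by simp, h⟩
      · exact Or.inr ⟨d, by simp [hd], hds⟩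
    · rintro (h | ⟨d, hd, hds⟩)
      · exact Or.inl (Or.inl h)
      · rcases List.mem_cons.mp hd with rfl | hd
        · exact Or.inl (Or.inr hds)
        · exact Or.inr ⟨d, hd, hds⟩

-- sum of a sublist of a descending-sorted list is at most the same-length prefix sum
theorem fbc_sublist_sum_le {m d : List Int} (h : m.Sublist d)
    (hd : d.Pairwise (fun a b => b ≤ a)) : m.sum ≤ (d.take m.length).sum := by
  induction h with
  | slnil => simp
  | @cons m d' x h ih =>
    rcases List.pairwise_cons.mp hd with ⟨hx, hd'⟩
    cases m with
    | nil => simp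
    | cons a m' =>
      have hlen : m'.length + 1 ≤ d'.length := h.length_le
      have hk : m'.length < d'.length := by omega
      have htake : d'.take (m'.length + 1) = d'.take m'.length ++ [d'[m'.length]] := by
        rw [List.take_add_one, List.getElem?_eq_getElem hk]; rfl
      have hle : d'[m'.length] ≤ x := hx _ (List.getElem_mem hk)
      have ihs := ih hd'
      have hsum : (d'.take (m'.length + 1)).sum = (d'.take m'.length).sum + d'[m'.length] := by
        rw [htake, List.sum_append, List.sum_cons, List.sum_nil, add_zero]
      simp only [List.length_cons, List.take_succ_cons, List.sum_cons] at ihs ⊢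
      omega
  | @cons₂ m' d' x h ih =>
    rcases List.pairwise_cons.mp hd with ⟨_, hd'⟩
    simp only [List.length_cons, List.take_succ_cons, List.sum_cons]
    have := ih hd'
    omega

theorem fbc_desc_pairwise (followers : List (List (String × Int))) :
    (fbcDesc followers).Pairwise (fun a b => b ≤ a) :=
  PySem.List.sorted_pairwise_rev (xs := followers.map fbcAtk) (key := fun x => x)

theorem fbc_desc_perm (followers : List (List (String × Int))) :
    (fbcDesc followers).Perm (followers.map fbcAtk) :=
  PySem.List.sorted_perm _ _ _

theorem fbc_desc_length (followers : List (List (String × Int))) :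
    (fbcDesc followers).length = followers.length := by
  rw [(fbc_desc_perm followers).length_eq, List.length_map]

-- feasibility of size r ↔ the top-r prefix sum reaches the target
theorem fbc_feasible_iff (followers : List (List (String × Int))) (t : Int) (r : Nat)
    (hr : r ≤ followers.length) :
    (∃ c ∈ PySem.List.combinations followers r, t ≤ fbcSum c) ↔ t ≤ fbcTop followers r := by
  constructor
  · rintro ⟨c, hc, hts⟩
    rcases (PySem.List.mem_combinations_iff followers r c).mp hc with ⟨hsub, hlen⟩
    set m := PySem.List.sorted (c.map fbcAtk) (fun x => x) true with hm
    have hmp : m.Perm (c.map fbcAtk) := PySem.List.sorted_perm _ _ _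
    have hmsort : m.Pairwise (fun a b => b ≤ a) :=
      PySem.List.sorted_pairwise_rev (xs := c.map fbcAtk) (key := fun x => x)
    have hsp : m.Subperm (fbcDesc followers) := by
      have h1 : (c.map fbcAtk).Sublist (followers.map fbcAtk) := hsub.map fbcAtk
      exact hmp.subperm.trans (h1.subperm.trans (fbc_desc_perm followers).symm.subperm)
    rcases hsp with ⟨l', hl'p, hl's⟩
    have hl'sort : l'.Pairwise (fun a b => b ≤ a) := (fbc_desc_pairwise followers).sublist hl's
    have heq : l' = m := hl'p.eq_of_pairwise (fun _ _ _ _ x y => le_antisymm y x) hl'sort hmsort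
    have hms : m.Sublist (fbcDesc followers) := heq ▸ hl's
    have hsum : m.sum = fbcSum c := hmp.sum_eq
    have hlen' : m.length = r := by rw [hmp.length_eq, List.length_map, hlen]
    have := fbc_sublist_sum_le hms (fbc_desc_pairwise followers)
    rw [hsum, hlen'] at this
    exact le_trans hts this
  · intro ht
    have hsub : ((fbcDesc followers).take r).Subperm (followers.map fbcAtk) :=
      (List.take_sublist r _).subperm.trans (fbc_desc_perm followers).subperm
    rcases hsub with ⟨u, hup, hus⟩
    rcases List.sublist_map_iff.mp hus with ⟨c, hcs, hcu⟩
    have hlen : c.length = r := by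
      have h1 : u.length = ((fbcDesc followers).take r).length := hup.length_eq
      have h2 : ((fbcDesc followers).take r).length = r := by
        rw [List.length_take, fbc_desc_length]; omega
      have h3 : u.length = c.length := by rw [hcu, List.length_map]
      omega
    refine ⟨c, (PySem.List.mem_combinations_iff followers r c).mpr ⟨hcs, hlen⟩, ?_⟩
    have : fbcSum c = fbcTop followers r := by
      unfold fbcSum fbcTop
      rw [← hcu, hup.sum_eq]
    omega

-- the while loop finds the first r' ≥ r in [r..n] whose prefix sum reaches the target
theorem fbc_findR_spec (followers : List (List (String × Int))) (t : Int) :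
    ∀ k r, 2 ≤ r → r ≤ followers.length → followers.length - r = k →
    fbcFindR t (fbcDesc followers) followers.length r (fbcTop followers r) =
      (List.range' r (followers.length + 1 - r)).find?
        (fun r' => decide (t ≤ fbcTop followers r')) := by
  intro k
  induction k with
  | zero =>
    intro r _ hrn hk
    have hrn' : r = followers.length := by omega
    have hone : followers.length + 1 - r = 1 := by omega
    rw [fbcFindR, hone, List.range'_one]
    by_cases h : fbcTop followers r < t
    · rw [if_pos h, if_pos (by omega : followers.length < r + 1)]
      rw [List.find?_cons_of_neg (by simp; omega), List.find?_nil]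
    · rw [if_neg h]
      rw [List.find?_cons_of_pos (by simp; omega)]
  | succ k ih =>
    intro r hr2 hrn hk
    have hrlt : r < followers.length := by omega
    have hsplit : followers.length + 1 - r = (followers.length - r) + 1 := by omega
    rw [fbcFindR, hsplit, List.range'_succ]
    by_cases h : fbcTop followers r < t
    · rw [if_pos h, if_neg (by omega : ¬ followers.length < r + 1)]
      have hget : (fbcDesc followers).getD r 0 = (fbcDesc followers)[r]'(by rw [fbc_desc_length]; omega) := by
        rw [List.getD_eq_getElem]
      have hrd : r < (fbcDesc followers).length := by rw [fbc_desc_length]; omega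
      have htop : fbcTop followers r + (fbcDesc followers).getD r 0 = fbcTop followers (r + 1) := by
        unfold fbcTop
        rw [hget, List.take_add_one, List.getElem?_eq_getElem hrd]
        rw [Option.toList_some, List.sum_append, List.sum_cons, List.sum_nil]
        ring
      rw [htop, ih (r + 1) (by omega) (by omega) (by omega)]
      rw [List.find?_cons_of_neg (by simp; omega)]
      have : followers.length + 1 - (r + 1) = followers.length - r := by omega
      rw [this]
    · rw [if_neg h]
      rw [List.find?_cons_of_pos (by simp; omega)]

-- A's outer loop returns, at the first feasible size, the fold ov that size's combinations
theorem fbc_loop_spec (followers : List (List (String × Int))) (t : Int) :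
    ∀ rs : List Nat, (∀ r ∈ rs, r ≤ followers.length) →
    fbcLoop followers t rs =
      match rs.find? (fun r => decide (t ≤ fbcTop followers r)) with
      | none => none
      | some r =>
        ((PySem.List.combinations followers r).foldl (fbcStep t) none).map Prod.snd := by
  intro rs
  induction rs with
  | nil => intro _; simp [fbcLoop]
  | cons r rs ih =>
    intro hmem
    have hr : r ≤ followers.length := hmem r (by simp)
    by_cases h : t ≤ fbcTop followers r
    · have hfeas := (fbc_feasible_iff followers t r hr).mpr h
      have hsome : ((PySem.List.combinations followers r).foldl (fbcStep t) none).isSome = true :=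
        (fbc_fold_isSome t _ none).mpr (Or.inr hfeas)
      rw [List.find?_cons_of_pos (by simpa using h)]
      simp only [fbcLoop]
      cases hfold : (PySem.List.combinations followers r).foldl (fbcStep t) none with
      | none => rw [hfold] at hsome; simp at hsome
      | some b => simp
    · have hnone : (PySem.List.combinations followers r).foldl (fbcStep t) none = none := by
        cases hf : (PySem.List.combinations followers r).foldl (fbcStep t) none with
        | none => rfl
        | some b =>
          have : ((PySem.List.combinations followers r).foldl (fbcStep t) none).isSome = true := by
            rw [hf]; rfl
          rcases (fbc_fold_isSome t _ none).mp this with h' | h'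
          · simp at h'
          · exact absurd ((fbc_feasible_iff followers t r hr).mp h') h
      simp only [fbcLoop]
      rw [hnone, List.find?_cons_of_neg (by simpa using h)]
      exact ih (fun r' hr' => hmem r' (List.mem_cons_of_mem _ hr'))

-- ===== VERDICT (by name: the statement is the Claim_ definition above) =====
theorem find_best_combo_spec : Claim_equal_find_best_combo := by
  intro followers t _hdom _hpre
  unfold Spec_find_best_combo find_best_combo find_best_combo_alt
  by_cases hn : followers.length < 2
  · have h0 : followers.length - 1 = 0 := by omega
    rw [h0, if_pos hn]
    simp [fbcLoop]
  · rw [if_neg hn]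
    have hd2 : 2 ≤ (fbcDesc followers).length := by rw [fbc_desc_length]; omega
    obtain ⟨a, b, rest, hd⟩ : ∃ a b rest, fbcDesc followers = a :: b :: rest := by
      cases hcase : fbcDesc followers with
      | nil => rw [hcase] at hd2; simp at hd2
      | cons a tl =>
        cases tl with
        | nil => rw [hcase] at hd2; simp at hd2
        | cons b rest => exact ⟨a, b, rest, rfl⟩
    have hinit : (fbcDesc followers).getD 0 0 + (fbcDesc followers).getD 1 0 = fbcTop followers 2 := by
      rw [hd]; unfold fbcTop; rw [hd]; simp
    rw [hinit, fbc_findR_spec followers t (followers.length - 2) 2 (by omega) (by omega) (by omega)]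
    have hlen1 : followers.length + 1 - 2 = followers.length - 1 := by omega
    rw [hlen1]
    rw [fbc_loop_spec followers t (List.range' 2 (followers.length - 1))
      (fun r hr => by have := List.mem_range'_1.mp hr; omega)]
    cases hf : (List.range' 2 (followers.length - 1)).find?
        (fun r' => decide (t ≤ fbcTop followers r')) with
    | none => rfl
    | some r =>
      have hstep : fbcStep t = fbcAltStep t :=
        funext fun acc => funext fun c => fbc_step_eq t acc c
      rw [hstep]
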